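-- pv_equiv track=rewrite | github.com/umyunsang/Python | 12week/toggle_case.py | solution
-- ===== SOURCE A (Python) =====
-- def solution(s):
--     # 문자열을 공백을 기준으로 나누어 단어 리스트를 생성
--     words = s.split(' ')
--
--     # 변환된 단어들을 저장할 리스트
--     result = []
--
--     # 각 단어에 대해 처리
--     for word in words:
--         msg = ''  # 변환된 단어를 저장할 변수
--         for idx in range(len(word)):
--             # 짝수번째 인덱스는 대문자
--             if idx % 2 == 0:
--                 msg += word[idx].upper()
--             # 홀수번째 인덱스는 소문자
--             else:
--                 msg += word[idx].lower()
--         # 변환된 단어를 결과 리스트에 추가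
--         result.append(msg)
--
--     # 결과 리스트를 공백으로 구분하여 문자열로 변환
--     result = ' '.join(result)
--     return result
-- ===== SOURCE B (Python) =====
-- def solution(s):
--     out = []
--     i = 0
--     for ch in s:
--         if ch == ' ':
--             out.append(' ')
--             i = 0
--         else:
--             out.append(ch.upper() if i % 2 == 0 else ch.lower())
--             i += 1
--     return ''.join(out)
-- ===== Notes on version B (the rewrite author's own statement) =====
-- stated objective: simpler
-- what changed: Replaces split(' ')/per-word index loop/join with a single pass over the characters keeping a per-word counter that resets on each space.
import Mathlib
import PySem

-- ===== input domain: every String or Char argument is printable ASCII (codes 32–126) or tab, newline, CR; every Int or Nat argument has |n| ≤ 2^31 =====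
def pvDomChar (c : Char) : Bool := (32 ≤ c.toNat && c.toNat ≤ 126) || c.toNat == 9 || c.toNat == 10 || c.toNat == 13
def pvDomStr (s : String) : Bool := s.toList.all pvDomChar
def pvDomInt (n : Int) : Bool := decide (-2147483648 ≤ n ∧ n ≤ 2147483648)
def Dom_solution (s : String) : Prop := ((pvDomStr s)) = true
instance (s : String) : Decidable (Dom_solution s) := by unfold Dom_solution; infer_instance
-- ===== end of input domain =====

-- B replaces A's split(' ')/per-word loop/join with one pass over the characters and a
-- counter reset on each space (objective: simpler).

-- ===== PORT A =====
-- inner loop: for idx in range(len(word)): msg += word[idx].upper()/lower()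
def solWordA (w : List Char) : List Char :=
  (PySem.List.pyRange 0 (PySem.List.len w) 1).foldl
    (fun msg idx =>
      msg ++ [if PySem.Int.mod idx 2 = 0
              then PySem.Chars.upperChar (PySem.List.pyGetD w idx ' ')
              else PySem.Chars.lowerChar (PySem.List.pyGetD w idx ' ')]) []

def solution (s : String) : String :=
  let words := PySem.Chars.splitOn s.toList [' ']
  let result := words.foldl (fun res w => res ++ [solWordA w]) []
  String.ofList (PySem.Chars.join [' '] result)

-- ===== PORT B =====
-- one pass: space is emitted verbatim and resets the counter; otherwise alternate case
def goB : List Char → Nat → List Char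
  | [], _ => []
  | c :: cs, i =>
    if c = ' ' then ' ' :: goB cs 0
    else (if i % 2 = 0 then PySem.Chars.upperChar c else PySem.Chars.lowerChar c) :: goB cs (i + 1)

def solution_alt (s : String) : String := String.ofList (goB s.toList 0)

-- ===== PRECONDITION & SPEC =====
def Spec_solution (s : String) (out : String) : Prop := out = solution_alt s
instance (s : String) (out : String) : Decidable (Spec_solution s out) := by unfold Spec_solution; infer_instance

-- ===== CLAIM (what is proved, stated in full; the proofs are below) =====
def Claim_equal_solution : Prop := ∀ (s : String), Dom_solution s → Spec_solution s (solution s)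

-- ===== LEMMAS AND PROOFS =====

-- toggle of one char at per-word index i
def tog (i : Nat) (c : Char) : Char :=
  if i % 2 = 0 then PySem.Chars.upperChar c else PySem.Chars.lowerChar c

-- the per-word transform, by structural recursion from start index j
def fA : List Char → Nat → List Char
  | [], _ => []
  | c :: cs, j => tog j c :: fA cs (j + 1)

-- simple recursive model of s.split(' ')
def mySplit : List Char → List (List Char)
  | [] => [[]]
  | c :: cs =>
    if c = ' ' then [] :: mySplit cs
    else
      match mySplit cs with
      | [] => [[c]]
      | h :: t => (c :: h) :: t

lemma mySplit_ne_nil (cs : List Char) : mySplit cs ≠ [] := by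
  cases cs with
  | nil => simp [mySplit]
  | cons c cs =>
    simp only [mySplit]
    split_ifs
    · simp
    · cases mySplit cs <;> simp

-- characterization of PySem's splitOn.go for the single-char separator ' '
def consHead (x : List Char) : List (List Char) → List (List Char)
  | [] => [x]
  | h :: t => (x ++ h) :: t

lemma splitOn_go_spec : ∀ (fuel : Nat) (l cur : List Char) (acc : List (List Char)),
    l.length < fuel →
    PySem.Chars.splitOn.go [' '] fuel l cur acc
      = acc.reverse ++ consHead cur.reverse (mySplit l) := by
  intro fuel
  induction fuel with
  | zero => intro l cur acc h; omega
  | succ fuel ih =>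
    intro l cur acc h
    cases l with
    | nil =>
      simp [PySem.Chars.splitOn.go, mySplit, consHead]
    | cons c rest =>
      by_cases hc : c = ' '
      · subst hc
        rw [show PySem.Chars.splitOn.go [' '] (fuel+1) (' '::rest) cur acc
              = PySem.Chars.splitOn.go [' '] fuel (List.drop 1 (' '::rest)) [] (cur.reverse :: acc) by
            simp [PySem.Chars.splitOn.go, List.isPrefixOf]]
        rw [ih _ _ _ (by simpa using Nat.lt_of_succ_lt_succ h)]
        simp only [mySplit, List.drop_succ_cons, List.drop_zero]
        have hne := mySplit_ne_nil rest
        cases hms : mySplit rest with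
        | nil => exact absurd hms hne
        | cons h t => simp [consHead]
      · rw [show PySem.Chars.splitOn.go [' '] (fuel+1) (c::rest) cur acc
              = PySem.Chars.splitOn.go [' '] fuel rest (c :: cur) acc by
            simp [PySem.Chars.splitOn.go, List.isPrefixOf, Ne.symm hc]]
        rw [ih _ _ _ (by simpa using Nat.lt_of_succ_lt_succ h)]
        simp only [mySplit, if_neg hc]
        cases hms : mySplit rest with
        | nil => exact absurd hms (mySplit_ne_nil rest)
        | cons h t => simp [consHead]

lemma splitOn_space (cs : List Char) :
    PySem.Chars.splitOn cs [' '] = mySplit cs := by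
  have := splitOn_go_spec (cs.length + 1) cs [] [] (by omega)
  simpa [PySem.Chars.splitOn, consHead] using
    (by
      rw [PySem.Chars.splitOn]
      rw [this]
      have hne := mySplit_ne_nil cs
      cases hms : mySplit cs with
      | nil => exact absurd hms hne
      | cons h t => simp [consHead] :
        PySem.Chars.splitOn cs [' '] = mySplit cs)

-- A's inner range-loop computes fA from index 0
lemma range_map_tog (w : List Char) : ∀ (j : Nat),
    (List.range w.length).map (fun k => tog (j + k) (w.getD k ' ')) = fA w j := by
  induction w with
  | nil => intro j; simp [fA]
  | cons c cs ih =>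
    intro j
    rw [List.length_cons, List.range_succ_eq_map, List.map_cons, List.map_map]
    simp only [List.getD_cons_zero, Nat.add_zero, fA]
    congr 1
    have := ih (j + 1)
    rw [← this]
    apply List.map_congr_left
    intro k _
    simp only [Function.comp, List.getD_cons_succ]
    congr 1
    omega

lemma solWordA_eq_fA (w : List Char) : solWordA w = fA w 0 := by
  rw [solWordA, PySem.List.foldl_append_singleton_eq_map]
  have hlen : PySem.List.len w = (w.length : Int) := by simp [pysem]
  rw [hlen, PySem.List.pyRange_zero_natCast, List.map_map]
  rw [← range_map_tog w 0]
  apply List.map_congr_left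
  intro k hk
  simp only [Function.comp, tog]
  have h2 : PySem.Int.mod (k : Int) 2 = ((k % 2 : Nat) : Int) := by
    exact_mod_cast PySem.Int.mod_natCast k 2
  rw [h2]
  simp only [PySem.List.pyGetD_natCast]
  norm_cast
  rw [Nat.zero_add]

-- join over a cons-ed head character
lemma join_consHead (a : Char) (x : List Char) (l : List (List Char)) :
    PySem.Chars.join [' '] ((a :: x) :: l) = a :: PySem.Chars.join [' '] (x :: l) := by
  cases l with
  | nil => simp [PySem.Chars.join_singleton]
  | cons y t => simp [PySem.Chars.join_cons_cons]

def mapHead (f g : List Char → List Char) : List (List Char) → List (List Char)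
  | [] => []
  | h :: t => f h :: t.map g

-- the one-pass loop equals A's join-of-toggled-words, for any starting counter
lemma goB_spec : ∀ (cs : List Char) (i : Nat),
    goB cs i = PySem.Chars.join [' '] (mapHead (fA · i) (fA · 0) (mySplit cs)) := by
  intro cs
  induction cs with
  | nil => intro i; simp [goB, mySplit, mapHead, fA, PySem.Chars.join_singleton]
  | cons c cs ih =>
    intro i
    by_cases hc : c = ' '
    · subst hc
      simp only [goB, mySplit, mapHead]
      rw [ih 0]
      have hne := mySplit_ne_nil cs
      cases hms : mySplit cs with
      | nil => exact absurd hms hne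
      | cons h t =>
        simp [mapHead, fA, PySem.Chars.join_cons_cons]
    · simp only [goB, if_neg hc, mySplit]
      rw [ih (i + 1)]
      have hne := mySplit_ne_nil cs
      cases hms : mySplit cs with
      | nil => exact absurd hms hne
      | cons h t =>
        simp only [mapHead, fA]
        rw [join_consHead]
        simp [tog]

-- ===== VERDICT (by name: the statement is the Claim_ definition above) =====
theorem solution_spec : Claim_equal_solution := by
  intro s _
  show solution s = solution_alt s
  simp only [solution, solution_alt]
  rw [PySem.List.foldl_append_singleton_eq_map, splitOn_space, goB_spec]
  congr 1
  have hne := mySplit_ne_nil s.toList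
  cases hms : mySplit s.toList with
  | nil => exact absurd hms hne
  | cons h t =>
    simp only [mapHead]
    congr 1
    exact List.map_congr_left fun w _ => solWordA_eq_fA w
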